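-- pv_equiv track=rewrite | github.com/simuzin/Online_Judge | 프로그래머스/2/131127. 할인 행사/할인 행사.py | solution
-- ===== SOURCE A (Python) =====
-- from collections import Counter
--
-- def solution(want, number, discount):
--     answer = 0
--     want_dict = dict(zip(want,number))
--     for i in range(len(discount)-10+1):
--         temp = Counter(discount[i:i+10])
--         flag = 0
--         for product in want_dict:
--             if want_dict[product] <= temp[product]:
--                 flag += 1
--             else:
--                 break
--         if flag == len(want):
--             answer += 1
--     return answer
-- ===== SOURCE B (Python) =====
-- from collections import Counter
--
-- def solution(want, number, discount):
--     # Sliding window: maintain a Counter of the current 10-day window and the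
--     # number of wanted products currently meeting their threshold, updating
--     # both in O(1) per shift instead of rebuilding the window counter.
--     if len(discount) < 10:
--         return 0
--     need = dict(zip(want, number))
--     target = len(want)
--     cnt = Counter(discount[:10])
--     satisfied = sum(1 for p, k in need.items() if k <= cnt[p])
--     answer = 1 if satisfied == target else 0
--     for out, inc in zip(discount, discount[10:]):
--         if out in need and cnt[out] == need[out]:
--             satisfied -= 1
--         cnt[out] -= 1
--         cnt[inc] += 1
--         if inc in need and cnt[inc] == need[inc]:
--             satisfied += 1
--         if satisfied == target:
--             answer += 1
--     return answer
-- ===== Notes on version B (the rewrite author's own statement) =====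
-- stated objective: faster
-- what changed: A rebuilds a Counter of each 10-day window and rescans the whole wanted dict per offset; B slides one counter across discount, updating it and a running 'satisfied' tally in O(1) per shift and counting offsets where satisfied == len(want).
import Mathlib
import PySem

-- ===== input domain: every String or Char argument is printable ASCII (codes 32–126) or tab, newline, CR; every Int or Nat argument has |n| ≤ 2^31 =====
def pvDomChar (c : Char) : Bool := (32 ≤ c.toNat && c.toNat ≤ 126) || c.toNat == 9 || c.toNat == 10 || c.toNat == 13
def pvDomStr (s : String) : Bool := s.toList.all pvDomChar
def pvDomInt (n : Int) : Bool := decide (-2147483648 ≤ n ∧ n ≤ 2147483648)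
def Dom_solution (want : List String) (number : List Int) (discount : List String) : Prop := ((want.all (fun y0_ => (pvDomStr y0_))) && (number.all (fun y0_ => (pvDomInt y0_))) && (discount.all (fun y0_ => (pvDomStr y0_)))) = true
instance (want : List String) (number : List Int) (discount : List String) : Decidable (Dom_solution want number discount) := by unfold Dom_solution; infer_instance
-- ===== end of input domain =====

-- B replaces A's per-window Counter rebuild + per-window scan of the wanted dict by a
-- sliding window that updates one counter and a 'satisfied' tally in O(1) per shift.

-- ===== PORT A =====
-- inner 'for product in want_dict: … else: break' loop, flag accumulator
def flagLoopA (temp : PySem.Dict String Int) : List (String × Int) → Int → Int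
  | [], flag => flag
  | (p, k) :: rest, flag =>
      if k ≤ temp.getD p 0 then flagLoopA temp rest (flag + 1) else flag

def solution (want : List String) (number : List Int) (discount : List String) : Int :=
  let want_dict : PySem.Dict String Int := PySem.Dict.ofList (List.zip want number)
  (PySem.List.pyRange 0 ((discount.length : Int) - 10 + 1) 1).foldl
    (fun answer i =>
      let temp := PySem.Dict.counter (PySem.List.slice discount (some i) (some (i + 10)))
      let flag := flagLoopA temp want_dict.items 0
      if flag = (want.length : Int) then answer + 1 else answer) 0

-- ===== PORT B =====
-- one sliding-window step: retire 'out', admit 'inc', maintain cnt/satisfied/answer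
def stepB (need : PySem.Dict String Int) (target : Int)
    (st : PySem.Dict String Int × Int × Int) (oi : String × String) :
    PySem.Dict String Int × Int × Int :=
  let cnt := st.1
  let sat := st.2.1
  let ans := st.2.2
  let sat := if need.contains oi.1 ∧ cnt.getD oi.1 0 = need.getD oi.1 0 then sat - 1 else sat
  let cnt := cnt.insert oi.1 (cnt.getD oi.1 0 - 1)
  let cnt := cnt.insert oi.2 (cnt.getD oi.2 0 + 1)
  let sat := if need.contains oi.2 ∧ cnt.getD oi.2 0 = need.getD oi.2 0 then sat + 1 else sat
  let ans := if sat = target then ans + 1 else ans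
  (cnt, sat, ans)

def solution_alt (want : List String) (number : List Int) (discount : List String) : Int :=
  if discount.length < 10 then 0
  else
    let need : PySem.Dict String Int := PySem.Dict.ofList (List.zip want number)
    let target : Int := (want.length : Int)
    let cnt := PySem.Dict.counter (PySem.List.slice discount none (some 10))
    let sat : Int := need.items.foldl
      (fun s pk => if pk.2 ≤ cnt.getD pk.1 0 then s + 1 else s) 0
    let answer : Int := if sat = target then 1 else 0
    ((List.zip discount (PySem.List.slice discount (some 10) none)).foldl
      (stepB need target) (cnt, sat, answer)).2.2

-- ===== PRECONDITION & SPEC =====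
def Spec_solution (want : List String) (number : List Int) (discount : List String) (out : Int) : Prop := out = solution_alt want number discount
instance (want : List String) (number : List Int) (discount : List String) (out : Int) : Decidable (Spec_solution want number discount out) := by unfold Spec_solution; infer_instance

-- ===== CLAIM (what is proved, stated in full; the proofs are below) =====
def Claim_equal_solution : Prop := ∀ (want : List String) (number : List Int) (discount : List String), Dom_solution want number discount → Spec_solution want number discount (solution want number discount)

-- ===== LEMMAS AND PROOFS =====

-- number of pairs (p, k) whose threshold k is met by the count function c
def scnt (c : String → Int) : List (String × Int) → Int
  | [] => 0
  | (p, k) :: r => (if k ≤ c p then 1 else 0) + scnt c r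

-- good windows among all suffixes of length ≥ 10 (offset 0 included), P abstract over the window
def T (P : List String → Prop) [DecidablePred P] : List String → Int
  | [] => 0
  | a :: r => (if 9 ≤ r.length ∧ P ((a :: r).take 10) then (1 : Int) else 0) + T P r

lemma scnt_le (c : String → Int) (l : List (String × Int)) : scnt c l ≤ (l.length : Int) := by
  induction l with
  | nil => simp [scnt]
  | cons pk r ih =>
      obtain ⟨p, k⟩ := pk; simp only [scnt, List.length_cons]; split <;> omega

lemma scnt_eq_len_iff (c : String → Int) (l : List (String × Int)) :
    scnt c l = (l.length : Int) ↔ ∀ pk ∈ l, pk.2 ≤ c pk.1 := by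
  induction l with
  | nil => simp [scnt]
  | cons pk r ih =>
      obtain ⟨p, k⟩ := pk
      have h1 := scnt_le c r
      simp only [scnt, List.length_cons, List.mem_cons]
      constructor
      · intro h
        have hsat : k ≤ c p := by by_contra hn; simp [hn] at h; omega
        have : scnt c r = (r.length : Int) := by simp [hsat] at h; omega
        rcases ih.mp this with h2
        rintro q (rfl | hq)
        · exact hsat
        · exact h2 q hq
      · intro h
        have hsat : k ≤ c p := h (p, k) (Or.inl rfl)
        have : scnt c r = (r.length : Int) := ih.mpr (fun q hq => h q (Or.inr hq))
        simp [hsat, this]; ring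

lemma flagLoopA_le (temp : PySem.Dict String Int) (l : List (String × Int)) :
    ∀ f : Int, flagLoopA temp l f ≤ f + (l.length : Int) := by
  induction l with
  | nil => intro f; simp [flagLoopA]
  | cons pk r ih =>
      intro f; obtain ⟨p, k⟩ := pk
      simp only [flagLoopA, List.length_cons]
      split
      · have := ih (f + 1); push_cast; omega
      · push_cast; omega

lemma flagLoopA_eq_len_iff (temp : PySem.Dict String Int) (l : List (String × Int)) :
    ∀ f : Int, (flagLoopA temp l f = f + (l.length : Int) ↔ ∀ pk ∈ l, pk.2 ≤ temp.getD pk.1 0) := by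
  induction l with
  | nil => intro f; simp [flagLoopA]
  | cons pk r ih =>
      intro f; obtain ⟨p, k⟩ := pk
      have hle := flagLoopA_le temp r (f + 1)
      simp only [flagLoopA, List.length_cons, List.mem_cons]
      constructor
      · intro h
        by_cases hsat : k ≤ temp.getD p 0
        · simp only [hsat, if_true] at h
          have : flagLoopA temp r (f + 1) = (f + 1) + (r.length : Int) := by
            push_cast at h ⊢; omega
          rcases (ih (f + 1)).mp this with h2
          rintro q (rfl | hq)
          · exact hsat
          · exact h2 q hq
        · simp only [hsat, if_false] at h; omega
      · intro h
        have hsat : k ≤ temp.getD p 0 := h (p, k) (Or.inl rfl)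
        have : flagLoopA temp r (f + 1) = (f + 1) + (r.length : Int) :=
          (ih (f + 1)).mpr (fun q hq => h q (Or.inr hq))
        simp [hsat, this]; ring

-- A's break-loop flag hits target iff the total satisfied count does (target ≥ #items)
lemma cond_iff (temp : PySem.Dict String Int) (l : List (String × Int)) (t : Int)
    (hlen : (l.length : Int) ≤ t) :
    (flagLoopA temp l 0 = t) ↔ (scnt (fun p => temp.getD p 0) l = t) := by
  constructor
  · intro h
    have h1 := flagLoopA_le temp l 0
    have ht : t = (l.length : Int) := by omega
    have hall := (flagLoopA_eq_len_iff temp l 0).mp (by omega)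
    rw [ht]
    exact (scnt_eq_len_iff _ l).mpr hall
  · intro h
    have h1 := scnt_le (fun p => temp.getD p 0) l
    have ht : t = (l.length : Int) := by omega
    have hall := (scnt_eq_len_iff (fun p => temp.getD p 0) l).mp (by omega)
    have := (flagLoopA_eq_len_iff temp l 0).mpr hall
    omega

lemma foldl_sat_eq (c : String → Int) (l : List (String × Int)) :
    ∀ s : Int, l.foldl (fun s pk => if pk.2 ≤ c pk.1 then s + 1 else s) s = s + scnt c l := by
  induction l with
  | nil => intro s; simp [scnt]
  | cons pk r ih =>
      intro s; obtain ⟨p, k⟩ := pk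
      simp only [List.foldl_cons, scnt]
      rw [ih]; split <;> ring

-- changing the count function at the single key o shifts scnt by the crossing indicator
lemma scnt_shift (c c' : String → Int) (o : String) (ko : Int)
    (h : ∀ p, p ≠ o → c' p = c p) :
    ∀ l : List (String × Int), (l.map Prod.fst).Nodup → (∀ k, (o, k) ∈ l → k = ko) →
      scnt c' l = scnt c l +
        (if o ∈ l.map Prod.fst then
          (if ko ≤ c' o then (1 : Int) else 0) - (if ko ≤ c o then 1 else 0) else 0) := by
  intro l
  induction l with
  | nil => simp [scnt]
  | cons pk r ih =>
      intro hnd hko; obtain ⟨p, k⟩ := pk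
      simp only [List.map_cons, List.nodup_cons] at hnd
      simp only [scnt, List.map_cons, List.mem_cons]
      by_cases hpo : p = o
      · subst hpo
        have hk : k = ko := hko k (by simp)
        subst hk
        have hnr : p ∉ r.map Prod.fst := hnd.1
        have hko' : ∀ k', (p, k') ∈ r → k' = k := by
          intro k' hk'
          exact absurd (List.mem_map_of_mem (f := Prod.fst) hk') hnr
        rw [ih hnd.2 hko']
        simp [hnr]
        ring
      · have hcp : c' p = c p := h p hpo
        have hko' : ∀ k', (o, k') ∈ r → k' = ko := by
          intro k' hk'
          exact hko k' (List.mem_cons_of_mem _ hk')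
        have hiff : (o = p ∨ o ∈ r.map Prod.fst) ↔ o ∈ r.map Prod.fst := by
          constructor
          · rintro (rfl | hm)
            · exact absurd rfl hpo
            · exact hm
          · exact Or.inr
        rw [ih hnd.2 hko', hcp]
        simp only [hiff]
        ring

-- size bound: a dict built by inserts from a list has at most that many items
lemma size_foldl_insert_le (l : List (String × Int)) :
    ∀ d : PySem.Dict String Int,
      (l.foldl (fun acc p => acc.insert p.1 p.2) d).size ≤ d.size + l.length := by
  induction l with
  | nil => intro d; simp
  | cons pk r ih =>
      intro d
      simp only [List.foldl_cons, List.length_cons]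
      calc (r.foldl (fun acc p => acc.insert p.1 p.2) (d.insert pk.1 pk.2)).size
          ≤ (d.insert pk.1 pk.2).size + r.length := ih _
        _ ≤ d.size + (r.length + 1) := by
            rw [PySem.Dict.size_insert]; split <;> omega

lemma items_len_le (want : List String) (number : List Int) :
    ((PySem.Dict.ofList (List.zip want number)).items.length : Int) ≤ (want.length : Int) := by
  have h1 : (PySem.Dict.ofList (List.zip want number)).size
      ≤ (PySem.Dict.empty : PySem.Dict String Int).size + (List.zip want number).length := by
    simpa [PySem.Dict.ofList, PySem.Dict.update] using
      size_foldl_insert_le (List.zip want number) (PySem.Dict.empty : PySem.Dict String Int)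
  have h2 : (List.zip want number).length ≤ want.length := by
    rw [List.length_zip]; omega
  have h3 : (PySem.Dict.empty : PySem.Dict String Int).size = 0 := rfl
  have h4 : (PySem.Dict.ofList (List.zip want number)).size
      = (PySem.Dict.ofList (List.zip want number)).items.length := rfl
  omega

lemma T_short (P : List String → Prop) [DecidablePred P] :
    ∀ v : List String, v.length ≤ 9 → T P v = 0 := by
  intro v
  induction v with
  | nil => intro _; simp [T]
  | cons a r ih =>
      intro h
      simp only [List.length_cons] at h
      simp only [T]
      rw [ih (by omega)]
      have : ¬ (9 ≤ r.length) := by omega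
      simp [this]

lemma foldl_if_congr {β : Type} (l : List β) (C C' : β → Prop) [DecidablePred C] [DecidablePred C']
    (h : ∀ k ∈ l, C k ↔ C' k) :
    ∀ a : Int, l.foldl (fun a k => if C k then a + 1 else a) a
      = l.foldl (fun a k => if C' k then a + 1 else a) a := by
  induction l with
  | nil => intro a; simp
  | cons x r ih =>
      intro a
      simp only [List.foldl_cons]
      rw [if_congr (h x (by simp)) rfl rfl]
      exact ih (fun k hk => h k (List.mem_cons_of_mem _ hk)) _

lemma foldl_shift {β : Type} (f : β → Prop) [DecidablePred f] (l : List β) :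
    ∀ a : Int, l.foldl (fun a k => if f k then a + 1 else a) a
      = a + l.foldl (fun a k => if f k then a + 1 else a) 0 := by
  induction l with
  | nil => intro a; simp
  | cons x r ih =>
      intro a
      simp only [List.foldl_cons]
      rw [ih, ih (if f x then (0:Int) + 1 else 0)]
      split <;> ring

-- the T recursion equals A's indexed fold over all window offsets
lemma T_eq_fold (P : List String → Prop) [DecidablePred P] :
    ∀ d : List String,
      (List.range (d.length - 9)).foldl
        (fun a k => if P ((d.drop k).take 10) then a + 1 else a) 0
      = T P d := by
  intro d
  induction d with
  | nil => simp [T]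
  | cons x r ih =>
      by_cases hr : 9 ≤ r.length
      · have hlen : (x :: r).length - 9 = (r.length - 9) + 1 := by
          simp only [List.length_cons]; omega
        rw [hlen, List.range_succ_eq_map]
        simp only [List.foldl_cons, List.foldl_map]
        refine Eq.trans (foldl_if_congr (List.range (r.length - 9))
          (fun k => P (((x :: r).drop k.succ).take 10))
          (fun k => P ((r.drop k).take 10))
          (fun k _ => by simp) _) ?_
        refine Eq.trans (foldl_shift (fun k => P ((r.drop k).take 10)) (List.range (r.length - 9)) _) ?_
        beta_reduce
        rw [ih]
        simp only [T, List.drop_zero]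
        simp [hr]
      · have hlen : (x :: r).length - 9 = 0 := by simp only [List.length_cons]; omega
        rw [hlen]
        simp only [List.range_zero, List.foldl_nil, T]
        rw [T_short P r (by omega)]
        have : ¬ (9 ≤ r.length) := hr
        simp [this]

lemma T_cons_long (P : List String → Prop) [DecidablePred P] (v : List String)
    (h : 10 ≤ v.length) :
    T P v = (if P (v.take 10) then (1 : Int) else 0) + T P v.tail := by
  cases v with
  | nil => simp at h
  | cons a r =>
      simp only [List.length_cons] at h
      simp only [T, List.tail_cons]
      have : 9 ≤ r.length := by omega
      simp [this]

-- retiring one occurrence of o from the window moves scnt down exactly on the threshold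
lemma sat_step_dec (need : PySem.Dict String Int) (hnd : need.keys.Nodup)
    (c0 c1 : String → Int) (o : String)
    (h1 : ∀ p, c1 p = if p = o then c0 o - 1 else c0 p) :
    scnt c1 need.items
      = if need.contains o ∧ c0 o = need.getD o 0 then scnt c0 need.items - 1
        else scnt c0 need.items := by
  have hkeys : need.keys = need.items.map Prod.fst := rfl
  have hsh := scnt_shift c0 c1 o (need.getD o 0)
    (fun p hp => by rw [h1 p]; simp [hp]) need.items (by rw [← hkeys]; exact hnd)
    (fun k hk => (PySem.Dict.getD_of_mem_items need hk hnd 0).symm)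
  have h1o : c1 o = c0 o - 1 := by rw [h1]; simp
  rw [h1o] at hsh
  have hmem : o ∈ need.items.map Prod.fst ↔ need.contains o = true := by
    rw [PySem.Dict.contains_iff_mem_keys, hkeys]
  by_cases hco : need.contains o = true
  · have hco' : o ∈ need.items.map Prod.fst := hmem.mpr hco
    rw [hsh]
    simp only [hco', if_true, hco, true_and]
    generalize scnt c0 need.items = S
    generalize c0 o = X
    generalize need.getD o 0 = K
    split_ifs <;> omega
  · have hco' : o ∉ need.items.map Prod.fst := fun hm => hco (hmem.mp hm)
    rw [hsh]
    simp [hco', hco]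

-- admitting one occurrence of o into the window moves scnt up exactly on the threshold
lemma sat_step_inc (need : PySem.Dict String Int) (hnd : need.keys.Nodup)
    (c1 c2 : String → Int) (o : String)
    (h2 : ∀ p, c2 p = if p = o then c1 o + 1 else c1 p) :
    scnt c2 need.items
      = if need.contains o ∧ c2 o = need.getD o 0 then scnt c1 need.items + 1
        else scnt c1 need.items := by
  have hkeys : need.keys = need.items.map Prod.fst := rfl
  have hsh := scnt_shift c1 c2 o (need.getD o 0)
    (fun p hp => by rw [h2 p]; simp [hp]) need.items (by rw [← hkeys]; exact hnd)
    (fun k hk => (PySem.Dict.getD_of_mem_items need hk hnd 0).symm)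
  have h2o : c2 o = c1 o + 1 := by rw [h2]; simp
  rw [h2o] at hsh ⊢
  have hmem : o ∈ need.items.map Prod.fst ↔ need.contains o = true := by
    rw [PySem.Dict.contains_iff_mem_keys, hkeys]
  by_cases hco : need.contains o = true
  · have hco' : o ∈ need.items.map Prod.fst := hmem.mpr hco
    rw [hsh]
    simp only [hco', if_true, hco, true_and]
    generalize scnt c1 need.items = S
    generalize c1 o = X
    generalize need.getD o 0 = K
    split_ifs <;> omega
  · have hco' : o ∉ need.items.map Prod.fst := fun hm => hco (hmem.mp hm)
    rw [hsh]
    simp [hco', hco]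

lemma loopB (need : PySem.Dict String Int) (target : Int) (hnd : need.keys.Nodup) :
    ∀ (u : List String) (cnt : PySem.Dict String Int) (sat ans : Int),
      (∀ p, cnt.getD p 0 = ((u.take 10).count p : Int)) →
      sat = scnt (fun p => ((u.take 10).count p : Int)) need.items →
      ((List.zip u (u.drop 10)).foldl (stepB need target) (cnt, sat, ans)).2.2
        = ans + T (fun w => scnt (fun p => ((w.count p : Int))) need.items = target) u.tail := by
  intro u
  induction u with
  | nil => intro cnt sat ans hc hs; simp [T]
  | cons a u' ih =>
      intro cnt sat ans hc hs
      rw [List.drop_succ_cons]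
      cases h9 : u'.drop 9 with
      | nil =>
          rw [List.zip_nil_right]
          simp only [List.foldl_nil, List.tail_cons]
          rw [T_short _ u' (by have := List.drop_eq_nil_iff.mp h9; omega)]
          ring
      | cons inc rest =>
          have hlen10 : 10 ≤ u'.length := by
            have h := congrArg List.length h9
            simp only [List.length_drop, List.length_cons] at h
            omega
          have hrest : rest = u'.drop 10 := by
            have h := congrArg List.tail h9
            rw [List.tail_drop] at h
            simpa using h.symm
          have hw0 : (a :: u').take 10 = a :: u'.take 9 := by
            show (a :: u').take (9 + 1) = a :: u'.take 9
            rw [List.take_succ_cons]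
          have hw1 : u'.take 10 = u'.take 9 ++ [inc] := by
            have h10 : u'[9]? = some inc := by
              have h := (List.getElem?_drop (xs := u') (i := 9) (j := 0))
              rw [h9] at h
              simpa using h.symm
            show u'.take (9 + 1) = u'.take 9 ++ [inc]
            rw [List.take_add_one, h10]
            rfl
          rw [List.zip_cons_cons, hrest, List.foldl_cons, List.tail_cons]
          -- names for the updated state
          set cnt1 := cnt.insert a (cnt.getD a 0 - 1) with hcnt1
          set cnt2 := cnt1.insert inc (cnt1.getD inc 0 + 1) with hcnt2
          have hc1 : ∀ p, cnt1.getD p 0 = if p = a then cnt.getD a 0 - 1 else cnt.getD p 0 := by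
            intro p; rw [hcnt1, PySem.Dict.getD_insert]
          have hc2' : ∀ p, cnt2.getD p 0 = if p = inc then cnt1.getD inc 0 + 1 else cnt1.getD p 0 := by
            intro p; rw [hcnt2, PySem.Dict.getD_insert]
          have key : ∀ q : String, ((u'.take 9 ++ [inc]).count q : Int)
              = ((a :: u'.take 9).count q : Int)
                + (if inc = q then 1 else 0) - (if a = q then 1 else 0) := by
            intro q
            rw [List.count_append, List.count_cons, List.count_cons, List.count_nil]
            by_cases h1 : inc = q <;> by_cases h2 : a = q <;>
              simp [beq_iff_eq, h1, h2]
          have hc2 : ∀ p, cnt2.getD p 0 = ((u'.take 10).count p : Int) := by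
            intro p
            rw [hc2' p, hc1 p, hc1 inc, hw1, key p, ← hw0, ← hc p]
            by_cases hpi : p = inc
            · by_cases hia : inc = a
              · rw [if_pos hpi, if_pos hia, if_pos hpi.symm, if_pos (hpi.trans hia).symm,
                  hpi.trans hia]
                ring
              · rw [if_pos hpi, if_neg hia, if_pos hpi.symm,
                  if_neg (fun h : a = p => hia ((h.trans hpi).symm)), hpi]
                ring
            · rw [if_neg hpi, if_neg (fun h : inc = p => hpi h.symm)]
              by_cases hpa : p = a
              · rw [if_pos hpa, if_pos hpa.symm, hpa]
                ring
              · rw [if_neg hpa, if_neg (fun h : a = p => hpa h.symm)]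
                ring
          have hsat1 : (if need.contains a ∧ cnt.getD a 0 = need.getD a 0 then sat - 1 else sat)
              = scnt (fun p => cnt1.getD p 0) need.items := by
            rw [sat_step_dec need hnd (fun p => cnt.getD p 0) (fun p => cnt1.getD p 0) a hc1]
            have : sat = scnt (fun p => cnt.getD p 0) need.items := by
              rw [hs]; congr 1; funext p; rw [hc p]
            rw [this]
          have hsat2 : (if need.contains inc ∧ cnt2.getD inc 0 = need.getD inc 0
                then (if need.contains a ∧ cnt.getD a 0 = need.getD a 0 then sat - 1 else sat) + 1
                else (if need.contains a ∧ cnt.getD a 0 = need.getD a 0 then sat - 1 else sat))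
              = scnt (fun p => ((u'.take 10).count p : Int)) need.items := by
            rw [hsat1]
            rw [← sat_step_inc need hnd (fun p => cnt1.getD p 0) (fun p => cnt2.getD p 0) inc hc2']
            congr 1; funext p; rw [hc2 p]
          -- one unfolded step of the fold, then the induction hypothesis
          show ((u'.zip (u'.drop 10)).foldl (stepB need target) (stepB need target (cnt, sat, ans) (a, inc))).2.2 = _
          have hstep : stepB need target (cnt, sat, ans) (a, inc)
              = (cnt2, scnt (fun p => ((u'.take 10).count p : Int)) need.items,
                 if scnt (fun p => ((u'.take 10).count p : Int)) need.items = target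
                 then ans + 1 else ans) := by
            simp only [stepB, ← hcnt1, ← hcnt2, hsat2]
          rw [hstep, ih cnt2 _ _ hc2 rfl]
          rw [T_cons_long _ u' hlen10]
          split_ifs <;> ring

lemma A_eq_T (want : List String) (number : List Int) (discount : List String) :
    solution want number discount
      = T (fun w => scnt (fun p => ((w.count p : Int)))
            (PySem.Dict.ofList (List.zip want number)).items = (want.length : Int)) discount := by
  simp only [solution]
  by_cases hn : discount.length ≤ 9
  · rw [PySem.List.pyRange_one_eq_nil (by omega)]
    rw [List.foldl_nil, T_short _ discount hn]
  · have hx : ((discount.length : Int) - 10 + 1) = ((discount.length - 9 : Nat) : Int) := by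
      omega
    rw [hx, PySem.List.pyRange_zero_natCast, List.foldl_map]
    refine Eq.trans (foldl_if_congr (List.range (discount.length - 9))
      (fun k => flagLoopA
          (PySem.Dict.counter (PySem.List.slice discount (some ((k : Nat) : Int)) (some (((k : Nat) : Int) + 10))))
          (PySem.Dict.ofList (List.zip want number)).items 0 = (want.length : Int))
      (fun k => scnt (fun p => (((discount.drop k).take 10).count p : Int))
          (PySem.Dict.ofList (List.zip want number)).items = (want.length : Int))
      (fun k _ => ?_) 0)
      (T_eq_fold (fun w => scnt (fun p => ((w.count p : Int)))
        (PySem.Dict.ofList (List.zip want number)).items = (want.length : Int)) discount)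
    beta_reduce
    have hsl : PySem.List.slice discount (some ((k : Nat) : Int)) (some (((k : Nat) : Int) + 10))
        = (discount.drop k).take 10 := by
      have h10 : (((k : Nat) : Int) + 10) = (((k : Nat) : Int) + ((10 : Nat) : Int)) := by norm_num
      rw [h10, PySem.List.slice_natCast_add]
    rw [hsl]
    rw [cond_iff _ _ _ (items_len_le want number)]
    constructor
    · intro h
      rw [← h]; congr 1; funext p; rw [PySem.Dict.getD_counter]
    · intro h
      rw [← h]; congr 1; funext p; rw [PySem.Dict.getD_counter]

lemma B_eq_T (want : List String) (number : List Int) (discount : List String) :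
    solution_alt want number discount
      = T (fun w => scnt (fun p => ((w.count p : Int)))
            (PySem.Dict.ofList (List.zip want number)).items = (want.length : Int)) discount := by
  simp only [solution_alt]
  by_cases hn : discount.length < 10
  · rw [if_pos hn, T_short _ discount (by omega)]
  · rw [if_neg hn]
    have hnd : (PySem.Dict.ofList (List.zip want number)).keys.Nodup :=
      PySem.Dict.nodup_keys_ofList _
    have hsl1 : PySem.List.slice discount none (some 10) = discount.take 10 := by
      have h := PySem.List.slice_to_natCast discount 10
      norm_num at h
      exact h
    have hsl2 : PySem.List.slice discount (some 10) none = discount.drop 10 := by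
      have h := PySem.List.slice_from_natCast discount 10
      norm_num at h
      exact h
    rw [hsl1, hsl2]
    have hc : ∀ p, (PySem.Dict.counter (discount.take 10)).getD p 0
        = ((discount.take 10).count p : Int) := by
      intro p; rw [PySem.Dict.getD_counter]
    have hs : (PySem.Dict.ofList (List.zip want number)).items.foldl
          (fun s pk => if pk.2 ≤ (PySem.Dict.counter (discount.take 10)).getD pk.1 0 then s + 1 else s) 0
        = scnt (fun p => ((discount.take 10).count p : Int))
            (PySem.Dict.ofList (List.zip want number)).items := by
      rw [foldl_sat_eq (fun p => (PySem.Dict.counter (discount.take 10)).getD p 0)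
        (PySem.Dict.ofList (List.zip want number)).items 0]
      rw [zero_add]; congr 1; funext p; rw [hc p]
    rw [hs]
    refine Eq.trans (loopB (PySem.Dict.ofList (List.zip want number)) ((want.length : Int)) hnd
      discount (PySem.Dict.counter (discount.take 10)) _ _ hc rfl) ?_
    rw [T_cons_long _ discount (by omega)]

-- ===== VERDICT (by name: the statement is the Claim_ definition above) =====
theorem solution_spec : Claim_equal_solution := by
  intro want number discount _
  unfold Spec_solution
  rw [A_eq_T, B_eq_T]
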